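-- pv_equiv track=rewrite | github.com/pypi-data/pypi-mirror-398 | packages/ya-tagscript/ya_tagscript-1.6.1-py3-none-any.whl/ya_tagscript/util/conditionals.py | _find_zero_depth_operator
-- ===== SOURCE A (Python) =====
-- from typing import NamedTuple
--
-- class OperatorLocation(NamedTuple):
--     operator: str | None
--     start_idx: int
--     end_idx: int
--
-- def _find_zero_depth_operator(string: str) -> OperatorLocation | None:
--     """Find the first operator (==, !=, >=, <=, >, <) at zero nesting depth."""
--     operators = ["==", "!=", ">=", "<=", ">", "<"]
--     depth = 0
--
--     for i, ch in enumerate(string):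
--         if ch == "{":
--             depth += 1
--         elif ch == "}":
--             depth -= 1
--         elif depth == 0:
--             if i + 1 < len(string):
--                 possible_op = string[i : i + 2]
--                 if possible_op in operators:
--                     return OperatorLocation(possible_op, i, i + len(possible_op))
--             possible_op = ch
--             if possible_op in operators:
--                 return OperatorLocation(possible_op, i, i + len(possible_op))
--
--     return None
-- ===== SOURCE B (Python) =====
-- from typing import NamedTuple
--
-- class OperatorLocation(NamedTuple):
--     operator: str | None
--     start_idx: int
--     end_idx: int
--
-- _OPERATORS = ("==", "!=", ">=", "<=", ">", "<")
--
-- def _find_zero_depth_operator(string: str) -> OperatorLocation | None: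
--     for i in range(len(string)):
--         op = next((o for o in _OPERATORS if string.startswith(o, i)), None)
--         if op is not None and string[:i].count("{") == string[:i].count("}"):
--             return OperatorLocation(op, i, i + len(op))
--     return None
-- ===== Notes on version B (the rewrite author's own statement) =====
-- stated objective: alternative
-- what changed: Replaced the running-depth character scan with slicing and membership tests by a candidate scan that matches operators longest-first via startswith and decides zero depth by comparing brace counts of the prefix; no depth accumulator is kept.
import Mathlib
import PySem

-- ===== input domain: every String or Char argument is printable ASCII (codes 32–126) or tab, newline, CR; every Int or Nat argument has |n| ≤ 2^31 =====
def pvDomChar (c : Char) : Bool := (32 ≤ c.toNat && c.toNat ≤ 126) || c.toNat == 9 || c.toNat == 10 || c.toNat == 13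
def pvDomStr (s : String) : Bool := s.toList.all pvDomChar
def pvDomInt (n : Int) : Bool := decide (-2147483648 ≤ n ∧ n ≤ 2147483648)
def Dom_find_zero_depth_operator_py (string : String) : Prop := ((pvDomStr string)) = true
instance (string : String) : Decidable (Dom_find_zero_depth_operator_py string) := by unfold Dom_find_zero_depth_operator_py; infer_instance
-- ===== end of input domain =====

-- B replaces A's running-depth scan by a candidate scan with longest-first startswith matching
-- and per-candidate prefix brace counting (objective: alternative algorithm, not faster).

-- ===== PORT A =====
-- operators = ["==", "!=", ">=", "<=", ">", "<"] (as char lists)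
def pvOps : List (List Char) := [['=','='], ['!','='], ['>','='], ['<','='], ['>'], ['<']]

-- the `for i, ch in enumerate(string)` loop with early return; `rest` is the unread suffix
def pvAGo (full : List Char) : List Char → Nat → Int → Option (String × Int × Int)
  | [], _, _ => none
  | c :: cs, i, depth =>
    if c = '{' then pvAGo full cs (i+1) (depth+1)
    else if c = '}' then pvAGo full cs (i+1) (depth-1)
    else if depth = 0 then
      if (i : Int) + 1 < (full.length : Int) then
        -- possible_op = string[i : i + 2]
        let possible := PySem.List.slice full (some (i : Int)) (some ((i : Int) + 2))
        if possible ∈ pvOps then some (String.mk possible, (i : Int), (i : Int) + possible.length)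
        else if [c] ∈ pvOps then some (String.mk [c], (i : Int), (i : Int) + 1)
        else pvAGo full cs (i+1) depth
      else if [c] ∈ pvOps then some (String.mk [c], (i : Int), (i : Int) + 1)
      else pvAGo full cs (i+1) depth
    else pvAGo full cs (i+1) depth

def find_zero_depth_operator_py (string : String) : Option (String × Int × Int) :=
  pvAGo string.toList string.toList 0 0

-- ===== PORT B =====
-- _OPERATORS = ("==", "!=", ">=", "<=", ">", "<")
def pvOpsB : List (List Char) := [['=','='], ['!','='], ['>','='], ['<','='], ['>'], ['<']]

-- for i in range(len(string)): first operator with string.startswith(o, i) (exact for 0 ≤ i: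
-- List.isPrefixOf on the dropped suffix), then compare brace counts of string[:i]
def pvBGo (full : List Char) (i : Nat) : Option (String × Int × Int) :=
  if h : i < full.length then
    match pvOpsB.find? (fun o => o.isPrefixOf (full.drop i)) with
    | some o =>
      if (full.take i).count '{' = (full.take i).count '}' then
        some (String.mk o, (i : Int), (i : Int) + o.length)
      else pvBGo full (i+1)
    | none => pvBGo full (i+1)
  else none
termination_by full.length - i

def find_zero_depth_operator_py_alt (string : String) : Option (String × Int × Int) :=
  pvBGo string.toList 0

-- ===== PRECONDITION & SPEC =====
def Spec_find_zero_depth_operator_py (string : String) (out : Option (String × Int × Int)) : Prop := out = find_zero_depth_operator_py_alt string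
instance (string : String) (out : Option (String × Int × Int)) : Decidable (Spec_find_zero_depth_operator_py string out) := by unfold Spec_find_zero_depth_operator_py; infer_instance

-- ===== CLAIM (what is proved, stated in full; the proofs are below) =====
def Claim_equal_find_zero_depth_operator_py : Prop := ∀ (string : String), Dom_find_zero_depth_operator_py string → Spec_find_zero_depth_operator_py string (find_zero_depth_operator_py string)

-- ===== LEMMAS AND PROOFS =====

lemma pvLoop_eq (full : List Char) : ∀ (rest : List Char) (i : Nat) (depth : Int),
    rest = full.drop i →
    depth = ((full.take i).count '{' : Int) - ((full.take i).count '}' : Int) →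
    pvAGo full rest i depth = pvBGo full i := by
  intro rest
  induction rest with
  | nil =>
    intro i depth hrest _
    have hlen : full.length - i = 0 := by
      have := congrArg List.length hrest; simpa using this.symm
    rw [pvAGo, pvBGo]
    rw [dif_neg (by omega)]
  | cons c cs ih =>
    intro i depth hrest hd
    have hlen : cs.length + 1 = full.length - i := by
      have := congrArg List.length hrest; simpa using this
    have hi : i < full.length := by omega
    have hget : full[i]? = some c := by
      have h0 : (full.drop i)[0]? = full[i + 0]? := List.getElem?_drop
      rw [← hrest] at h0; simpa using h0.symm
    have hdrop1 : full.drop (i+1) = cs := by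
      have h : (full.drop i).tail = full.drop (i+1) := List.tail_drop
      rw [← hrest] at h; simpa using h.symm
    have htake : full.take (i+1) = full.take i ++ [c] := by
      rw [List.take_succ, hget]; rfl
    have ih' : ∀ dp : Int,
        dp = (((full.take i).count '{' + (if c = '{' then 1 else 0) : Nat) : Int)
             - (((full.take i).count '}' + (if c = '}' then 1 else 0) : Nat) : Int) →
        pvAGo full cs (i+1) dp = pvBGo full (i+1) := by
      intro dp hdp
      refine ih (i+1) dp hdrop1.symm ?_
      rw [htake]
      simp only [List.count_append, List.count_singleton]
      simpa using hdp
    have hB : pvBGo full i = (match pvOps.find? (fun o => o.isPrefixOf (c :: cs)) with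
        | some o => if (full.take i).count '{' = (full.take i).count '}' then
            some (String.mk o, (i : Int), (i : Int) + o.length) else pvBGo full (i+1)
        | none => pvBGo full (i+1)) := by
      rw [pvBGo, dif_pos hi, ← hrest, show pvOpsB = pvOps from rfl]
    have hslice : PySem.List.slice full (some (i : Int)) (some ((i : Int) + 2)) = (c :: cs).take 2 := by
      have h := PySem.List.slice_natCast_add full i 2
      push_cast at h ⊢
      rw [h, ← hrest]
    rw [pvAGo, hB]
    by_cases hc1 : c = '{'
    · subst hc1
      rw [if_pos rfl]
      rw [ih' (depth + 1) (by rw [if_pos rfl, if_neg (by decide)]; push_cast; omega)]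
      simp [pvOps, List.find?, List.isPrefixOf]
    · rw [if_neg hc1]
      by_cases hc2 : c = '}'
      · subst hc2
        rw [if_pos rfl]
        rw [ih' (depth - 1) (by rw [if_neg (by decide), if_pos rfl]; push_cast; omega)]
        simp [pvOps, List.find?, List.isPrefixOf]
      · rw [if_neg hc2]
        have ihO : pvAGo full cs (i+1) depth = pvBGo full (i+1) :=
          ih' depth (by rw [if_neg hc1, if_neg hc2]; push_cast; omega)
        have hcval : ((full.take i).count '{' = (full.take i).count '}') ↔ depth = 0 := by
          constructor <;> intro h <;> omega
        by_cases hd0 : depth = 0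
        · rw [if_pos hd0]
          match cs, hlen, ih', ihO, hB with
          | [], hlen, ih', ihO, hB =>
            simp only [List.length_nil] at hlen
            have hnot : ¬ ((i : Int) + 1 < (full.length : Int)) := by push_cast; omega
            rw [if_neg hnot]
            by_cases hgt : c = '>'
            · subst hgt
              simp [pvOps, List.find?, List.isPrefixOf, hcval.mpr hd0]
            · by_cases hlt : c = '<'
              · subst hlt
                simp [pvOps, List.find?, List.isPrefixOf, hcval.mpr hd0]
              · have hgt' : ('>' == c) = false := by simpa using Ne.symm hgt
                have hlt' : ('<' == c) = false := by simpa using Ne.symm hlt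
                rw [if_neg (by simp [pvOps, hgt, hlt]), ihO]
                simp [pvOps, List.find?, List.isPrefixOf, hgt', hlt']
          | d :: ds, hlen, ih', ihO, hB =>
            have hyes : ((i : Int) + 1 < (full.length : Int)) := by
              simp only [List.length_cons] at hlen; push_cast; omega
            rw [if_pos hyes, hslice]
            simp only [List.take_succ_cons, List.take_zero]
            by_cases h2 : [c, d] ∈ pvOps
            · rw [if_pos h2]
              have hF : pvOps.find? (fun o => o.isPrefixOf (c :: d :: ds)) = some [c, d] := by
                simp only [pvOps, List.mem_cons, List.not_mem_nil, or_false] at h2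
                rcases h2 with h | h | h | h | h | h <;>
                  first
                    | (simp only [List.cons.injEq, and_true] at h
                       obtain ⟨hc', hd'⟩ := h; subst hc'; subst hd'
                       simp [pvOps, List.find?, List.isPrefixOf])
                    | simp at h
              rw [hF]
              simp [hcval.mpr hd0]
            · rw [if_neg h2]
              by_cases hgt : c = '>'
              · subst hgt
                have hdne : d ≠ '=' := by intro h; subst h; simp [pvOps] at h2
                have hdne' : ('=' == d) = false := by simpa using Ne.symm hdne
                have hF : pvOps.find? (fun o => o.isPrefixOf ('>' :: d :: ds)) = some ['>'] := by
                  simp [pvOps, List.find?, List.isPrefixOf, hdne']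
                rw [if_pos (show ['>'] ∈ pvOps by simp [pvOps]), hF]
                simp [hcval.mpr hd0]
              · by_cases hlt : c = '<'
                · subst hlt
                  have hdne : d ≠ '=' := by intro h; subst h; simp [pvOps] at h2
                  have hdne' : ('=' == d) = false := by simpa using Ne.symm hdne
                  have hF : pvOps.find? (fun o => o.isPrefixOf ('<' :: d :: ds)) = some ['<'] := by
                    simp [pvOps, List.find?, List.isPrefixOf, hdne']
                  rw [if_pos (show ['<'] ∈ pvOps by simp [pvOps]), hF]
                  simp [hcval.mpr hd0]
                · rw [if_neg (by simp [pvOps, hgt, hlt]), ihO]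
                  have hgt' : ('>' == c) = false := by simpa using Ne.symm hgt
                  have hlt' : ('<' == c) = false := by simpa using Ne.symm hlt
                  have hF : pvOps.find? (fun o => o.isPrefixOf (c :: d :: ds)) = none := by
                    by_cases hde : d = '='
                    · subst hde
                      have hce : c ≠ '=' := fun h => h2 (by rw [h]; simp [pvOps])
                      have hcb : c ≠ '!' := fun h => h2 (by rw [h]; simp [pvOps])
                      have hce' : ('=' == c) = false := by simpa using Ne.symm hce
                      have hcb' : ('!' == c) = false := by simpa using Ne.symm hcb
                      simp [pvOps, List.find?, List.isPrefixOf, hce', hcb', hgt', hlt']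
                    · have hde' : ('=' == d) = false := by simpa using Ne.symm hde
                      simp [pvOps, List.find?, List.isPrefixOf, hde', hgt', hlt']
                  rw [hF]
        · rw [if_neg hd0, ihO]
          cases hF : pvOps.find? (fun o => o.isPrefixOf (c :: cs)) with
          | none => rfl
          | some o => exact (if_neg (fun h => hd0 (hcval.mp h))).symm

-- ===== VERDICT (by name: the statement is the Claim_ definition above) =====
theorem find_zero_depth_operator_py_spec : Claim_equal_find_zero_depth_operator_py := by
  intro s _
  unfold Spec_find_zero_depth_operator_py find_zero_depth_operator_py find_zero_depth_operator_py_alt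
  exact pvLoop_eq s.toList s.toList 0 0 rfl rfl
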